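-- pv_equiv track=rewrite | github.com/ChunkyTortoise/EnterpriseHub | ghl_real_estate_ai/services/repositories/json_repository.py | _has_required_amenities
-- ===== SOURCE A (Python) =====
-- from typing import Any, Dict, List, Optional, Union
--
-- def _has_required_amenities(prop: Dict[str, Any], required: List[str]) -> bool:
--     """Check if property has all required amenities"""
--     prop_amenities = prop.get("amenities", [])
--     if isinstance(prop_amenities, str):
--         prop_amenities = [a.strip().lower() for a in prop_amenities.split(",")]
--     else:
--         prop_amenities = [str(a).lower() for a in prop_amenities]
--
--     required_lower = [r.lower() for r in required]
--
--     return all(any(req in amenity for amenity in prop_amenities) for req in required_lower)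
-- ===== SOURCE B (Python) =====
-- def _has_required_amenities(prop, required):
--     """Check if property has all required amenities"""
--     prop_amenities = prop.get("amenities", [])
--     if isinstance(prop_amenities, str):
--         amenities = [a.strip().lower() for a in prop_amenities.split(",")]
--     else:
--         amenities = [str(a).lower() for a in prop_amenities]
--     missing = [r.lower() for r in required]
--     for amenity in amenities:
--         missing = [r for r in missing if r not in amenity]
--         if not missing:
--             return True
--     return not missing
-- ===== Notes on version B (the rewrite author's own statement) =====
-- stated objective: alternative
-- what changed: Instead of A's all/any double scan (every requirement scanned against every amenity), B makes one pass over the amenities maintaining a shrinking worklist of still-unmet requirements, filtering it against each amenity and returning early once it is empty.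
import Mathlib
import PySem

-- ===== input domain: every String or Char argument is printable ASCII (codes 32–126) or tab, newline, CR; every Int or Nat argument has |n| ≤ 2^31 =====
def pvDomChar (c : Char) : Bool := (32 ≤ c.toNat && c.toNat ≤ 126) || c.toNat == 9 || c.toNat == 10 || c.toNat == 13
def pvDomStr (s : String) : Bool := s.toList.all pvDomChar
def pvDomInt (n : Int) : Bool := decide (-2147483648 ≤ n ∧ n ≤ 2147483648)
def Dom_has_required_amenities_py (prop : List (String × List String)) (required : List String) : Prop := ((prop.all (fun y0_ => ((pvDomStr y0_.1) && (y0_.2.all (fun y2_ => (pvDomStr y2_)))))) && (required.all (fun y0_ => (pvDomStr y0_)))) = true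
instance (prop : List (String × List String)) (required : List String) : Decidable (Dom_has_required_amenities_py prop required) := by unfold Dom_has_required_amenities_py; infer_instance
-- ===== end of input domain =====

-- B replaces A's all/any double scan by a single pass over the amenities that maintains a
-- shrinking worklist of still-unmet requirements (objective: alternative decomposition).
-- Under the type convention prop's values are List String, so A's isinstance(str) branch is
-- unrepresentable; both ports transliterate the list branch only.

-- ===== PORT A =====
def has_required_amenities_py (prop : List (String × List String)) (required : List String) : Bool :=
  let prop_amenities := ((PySem.Dict.mk prop).getD "amenities" []).map (fun a => PySem.Str.lower a)
  let required_lower := required.map (fun r => PySem.Str.lower r)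
  required_lower.all (fun req => prop_amenities.any (fun amenity => PySem.Str.isIn req amenity))

-- ===== PORT B =====
-- the 'for amenity in amenities' loop of Source B: state = the list of still-unmet requirements
def pvAltLoop : List String → List String → Bool
  | [], missing => missing.isEmpty
  | amenity :: rest, missing =>
      let missing' := missing.filter (fun r => !(PySem.Str.isIn r amenity))
      if missing'.isEmpty then true else pvAltLoop rest missing'

def has_required_amenities_py_alt (prop : List (String × List String)) (required : List String) : Bool :=
  let amenities := ((PySem.Dict.mk prop).getD "amenities" []).map (fun a => PySem.Str.lower a)
  let missing := required.map (fun r => PySem.Str.lower r)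
  pvAltLoop amenities missing

-- ===== PRECONDITION & SPEC =====
def Spec_has_required_amenities_py (prop : List (String × List String)) (required : List String) (out : Bool) : Prop := out = has_required_amenities_py_alt prop required
instance (prop : List (String × List String)) (required : List String) (out : Bool) : Decidable (Spec_has_required_amenities_py prop required out) := by unfold Spec_has_required_amenities_py; infer_instance

-- ===== CLAIM (what is proved, stated in full; the proofs are below) =====
def Claim_equal_has_required_amenities_py : Prop := ∀ (prop : List (String × List String)) (required : List String), Dom_has_required_amenities_py prop required → Spec_has_required_amenities_py prop required (has_required_amenities_py prop required)

-- ===== LEMMAS AND PROOFS =====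
-- B's worklist loop returns true iff every requirement still in the worklist occurs in some amenity
lemma pvAltLoop_eq (ams missing : List String) :
    pvAltLoop ams missing = missing.all (fun r => ams.any (fun a => PySem.Str.isIn r a)) := by
  induction ams generalizing missing with
  | nil => cases missing <;> simp [pvAltLoop]
  | cons a rest ih =>
    simp only [pvAltLoop]
    have key : ∀ (P : String → Bool),
        (missing.filter (fun r => !(PySem.Str.isIn r a))).all P
          = missing.all (fun r => PySem.Str.isIn r a || P r) := by
      intro P
      simp
    simp only [List.any_cons]
    split_ifs with h
    · rw [← key (fun r => rest.any (fun a => PySem.Str.isIn r a)), List.isEmpty_iff.mp h]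
      simp
    · rw [ih, key]

-- ===== VERDICT (by name: the statement is the Claim_ definition above) =====
theorem has_required_amenities_py_spec : Claim_equal_has_required_amenities_py := by
  intro prop required _
  unfold Spec_has_required_amenities_py has_required_amenities_py has_required_amenities_py_alt
  rw [pvAltLoop_eq]
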